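-- pv_equiv track=rewrite | github.com/adityarao97/autonexus | backend/agents/material_analyst_agent.py | _combine_and_validate_materials
-- ===== SOURCE A (Python) =====
-- from typing import Dict, Any, List, Optional, Tuple
--
-- def _combine_and_validate_materials(known_materials: Dict[str, Any],
--                                   ai_materials: List[str], max_materials: int) -> List[str]:
--     """Combine knowledge base and AI-identified materials"""
--     combined_materials = []
--
--     # Priority 1: Known primary materials
--     if known_materials and "primary_materials" in known_materials:
--         for material in known_materials["primary_materials"][:max_materials]:
--             if material not in combined_materials:
--                 combined_materials.append(material)
--
--     # Priority 2: AI-identified materials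
--     for material in ai_materials:
--         if len(combined_materials) >= max_materials:
--             break
--         if material not in combined_materials:
--             combined_materials.append(material)
--
--     # Priority 3: Known secondary materials if still need more
--     if len(combined_materials) < max_materials and known_materials and "secondary_materials" in known_materials:
--         for material in known_materials["secondary_materials"]:
--             if len(combined_materials) >= max_materials:
--                 break
--             if material not in combined_materials:
--                 combined_materials.append(material)
--
--     # Ensure we have the requested number of materials
--     while len(combined_materials) < max_materials:
--         combined_materials.append(f"material_{len(combined_materials) + 1}")
--
--     return combined_materials[:max_materials]
-- ===== SOURCE B (Python) =====
-- def _combine_and_validate_materials(known_materials, ai_materials, max_materials):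
--     """Hash-dedup the whole prioritized candidate list at once, then truncate and pad."""
--     candidates = (known_materials.get("primary_materials", [])[:max_materials] if known_materials else []) \
--         + list(ai_materials) \
--         + (known_materials.get("secondary_materials", []) if known_materials else [])
--     result = list(dict.fromkeys(candidates))[:max_materials]
--     result += [f"material_{i + 1}" for i in range(len(result), max_materials)]
--     return result
-- ===== Notes on version B (the rewrite author's own statement) =====
-- stated objective: faster
-- what changed: Replaces A's three separately-guarded dedup passes (each with per-element list-membership scans and length/break caps) by one global hash-based dedup of the concatenated candidate list via dict.fromkeys, a truncating slice, and comprehension padding - no membership tests, caps or breaks remain.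
-- outside the precondition, e.g. on _combine_and_validate_materials({}, ['x', 'y'], -1): A returns [], B returns ['x']
import Mathlib
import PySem

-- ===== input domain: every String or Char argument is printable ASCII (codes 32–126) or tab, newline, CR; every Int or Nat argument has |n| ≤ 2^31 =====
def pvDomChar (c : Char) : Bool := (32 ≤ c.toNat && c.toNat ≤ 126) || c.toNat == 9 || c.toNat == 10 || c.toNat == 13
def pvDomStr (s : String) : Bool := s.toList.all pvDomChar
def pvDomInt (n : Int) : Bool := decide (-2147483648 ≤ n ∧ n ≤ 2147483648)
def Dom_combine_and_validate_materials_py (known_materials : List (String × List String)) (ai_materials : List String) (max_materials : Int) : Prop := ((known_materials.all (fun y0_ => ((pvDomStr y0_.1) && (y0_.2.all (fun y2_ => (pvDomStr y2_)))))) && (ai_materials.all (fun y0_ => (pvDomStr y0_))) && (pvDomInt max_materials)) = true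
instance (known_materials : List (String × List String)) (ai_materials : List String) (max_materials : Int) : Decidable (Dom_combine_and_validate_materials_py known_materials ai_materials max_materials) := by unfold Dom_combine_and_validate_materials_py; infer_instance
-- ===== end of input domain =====

-- B replaces A's three guarded dedup passes by one hash-based dedup (dict.fromkeys) of
-- the concatenated candidates, a truncating slice and comprehension padding; equivalence
-- is proved for non-negative max_materials.

-- ===== PORT A =====
-- Priority-1 loop of A: dedup-append with no break (the slice already bounds it)
def pvDedupAppend (acc : List String) (xs : List String) : List String :=
  xs.foldl (fun a m => if a.contains m then a else a ++ [m]) acc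

-- Priority-2/3 loops of A: break once len >= max, else dedup-append
def pvTakeLoop (maxm : Int) : List String → List String → List String
  | acc, [] => acc
  | acc, m :: rest =>
    if (acc.length : Int) ≥ maxm then acc
    else if acc.contains m then pvTakeLoop maxm acc rest
    else pvTakeLoop maxm (acc ++ [m]) rest

-- A's final while-loop padding
def pvPad (maxm : Int) (acc : List String) : List String :=
  if (acc.length : Int) < maxm then
    pvPad maxm (acc ++ ["material_" ++ PySem.Int.toStr ((acc.length : Int) + 1)])
  else acc
termination_by (maxm - acc.length).toNat
decreasing_by simp_all; omega

def combine_and_validate_materials_py (known_materials : List (String × List String)) (ai_materials : List String) (max_materials : Int) : List String :=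
  let d := PySem.Dict.ofList known_materials
  let c1 : List String :=
    if known_materials ≠ [] ∧ d.contains "primary_materials" then
      pvDedupAppend [] (PySem.List.slice (d.getD "primary_materials" []) none (some max_materials))
    else []
  let c2 := pvTakeLoop max_materials c1 ai_materials
  let c3 :=
    if (c2.length : Int) < max_materials ∧ known_materials ≠ [] ∧ d.contains "secondary_materials" then
      pvTakeLoop max_materials c2 (d.getD "secondary_materials" [])
    else c2
  PySem.List.slice (pvPad max_materials c3) none (some max_materials)

-- ===== PORT B =====
def combine_and_validate_materials_py_alt (known_materials : List (String × List String)) (ai_materials : List String) (max_materials : Int) : List String :=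
  let d := PySem.Dict.ofList known_materials
  let candidates :=
    (if known_materials ≠ [] then PySem.List.slice (d.getD "primary_materials" []) none (some max_materials) else [])
      ++ ai_materials
      ++ (if known_materials ≠ [] then d.getD "secondary_materials" [] else [])
  let result := PySem.List.slice (PySem.List.dedup candidates) none (some max_materials)
  result ++ (PySem.List.pyRange (result.length : Int) max_materials 1).map
      (fun i => "material_" ++ PySem.Int.toStr (i + 1))

-- ===== PRECONDITION & SPEC =====
-- Pre_ excludes negative max_materials (outside the task's natural domain of requested
-- counts): there A's immediate break and negative slices yield an accidental value while
-- B's global dedup-then-slice naturally keeps AI materials A's break discards.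
def Pre_combine_and_validate_materials_py (known_materials : List (String × List String)) (ai_materials : List String) (max_materials : Int) : Prop :=
  0 ≤ max_materials
instance (known_materials : List (String × List String)) (ai_materials : List String) (max_materials : Int) : Decidable (Pre_combine_and_validate_materials_py known_materials ai_materials max_materials) := by unfold Pre_combine_and_validate_materials_py; infer_instance

def pvWitness_combine_and_validate_materials_py : (List (String × List String)) × List String × Int :=
  ([("primary_materials", ["steel"]), ("secondary_materials", ["pine"])], ["oak"], 3)

def Spec_combine_and_validate_materials_py (known_materials : List (String × List String)) (ai_materials : List String) (max_materials : Int) (out : List String) : Prop := out = combine_and_validate_materials_py_alt known_materials ai_materials max_materials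
instance (known_materials : List (String × List String)) (ai_materials : List String) (max_materials : Int) (out : List String) : Decidable (Spec_combine_and_validate_materials_py known_materials ai_materials max_materials out) := by unfold Spec_combine_and_validate_materials_py; infer_instance

-- ===== CLAIM (what is proved, stated in full; the proofs are below) =====
def Claim_equal_combine_and_validate_materials_py : Prop := ∀ (known_materials : List (String × List String)) (ai_materials : List String) (max_materials : Int), Dom_combine_and_validate_materials_py known_materials ai_materials max_materials → Pre_combine_and_validate_materials_py known_materials ai_materials max_materials → Spec_combine_and_validate_materials_py known_materials ai_materials max_materials (combine_and_validate_materials_py known_materials ai_materials max_materials)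

-- ===== LEMMAS AND PROOFS =====
-- pvMerge is a proof-side reference loop: A's capped dedup loop in its general form
def pvMerge (maxm : Int) (acc : List String) : List String → List String
  | [] => acc
  | m :: rest =>
    if (acc.length : Int) ≥ maxm then acc
    else if acc.contains m then pvMerge maxm acc rest
    else pvMerge maxm (acc ++ [m]) rest

theorem pv_getD_nil (d : PySem.Dict String (List String)) (k : String)
    (h : d.contains k = false) : d.getD k [] = [] := by
  rw [PySem.Dict.getD_eq_get?_getD]
  have hs : (d.get? k).isSome = false := by rw [← PySem.Dict.contains_eq_isSome_get?]; exact h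
  cases hg : d.get? k <;> simp_all

theorem pvMerge_of_ge (maxm : Int) (acc ys : List String) (h : (acc.length : Int) ≥ maxm) :
    pvMerge maxm acc ys = acc := by
  cases ys with
  | nil => rfl
  | cons m rest => simp [pvMerge, h]

theorem pvMerge_append (maxm : Int) (acc xs ys : List String) :
    pvMerge maxm acc (xs ++ ys) = pvMerge maxm (pvMerge maxm acc xs) ys := by
  induction xs generalizing acc with
  | nil => rfl
  | cons m rest ih =>
    by_cases h : (acc.length : Int) ≥ maxm
    · rw [List.cons_append, pvMerge, pvMerge]
      simp only [h, if_pos]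
      exact (pvMerge_of_ge maxm acc ys h).symm
    · rw [List.cons_append, pvMerge, pvMerge]
      simp only [h, if_neg, if_false]
      by_cases hc : acc.contains m <;> simp only [hc, if_pos, if_neg, if_true, if_false] <;> exact ih _

theorem pvTakeLoop_eq_pvMerge (maxm : Int) (acc ys : List String) :
    pvTakeLoop maxm acc ys = pvMerge maxm acc ys := by
  induction ys generalizing acc with
  | nil => rfl
  | cons m rest ih => rw [pvTakeLoop, pvMerge]; split_ifs <;> first | rfl | exact ih _

theorem pvMerge_eq_pvDedupAppend (maxm : Int) (acc P : List String)
    (h : (acc.length : Int) + P.length ≤ maxm) :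
    pvMerge maxm acc P = pvDedupAppend acc P := by
  induction P generalizing acc with
  | nil => rfl
  | cons m rest ih =>
    have hlt : ¬ ((acc.length : Int) ≥ maxm) := by
      simp only [List.length_cons] at h; push_cast at h; omega
    rw [pvMerge, pvDedupAppend]
    simp only [hlt, if_false, List.foldl_cons]
    by_cases hc : acc.contains m
    · simp only [hc, if_true, if_pos]
      exact ih acc (by simp at h ⊢; omega)
    · simp only [hc, if_false, if_neg]
      exact ih (acc ++ [m]) (by simp at h ⊢; omega)

theorem pvMerge_length_le (maxm : Int) (acc ys : List String)
    (h : (acc.length : Int) ≤ maxm) :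
    ((pvMerge maxm acc ys).length : Int) ≤ maxm := by
  induction ys generalizing acc with
  | nil => exact h
  | cons m rest ih =>
    rw [pvMerge]
    split_ifs with h1 h2
    · exact h
    · exact ih acc h
    · exact ih (acc ++ [m]) (by simp; omega)

theorem pvDedupAppend_cons (acc : List String) (m : String) (rest : List String) :
    pvDedupAppend acc (m :: rest) =
      if acc.contains m then pvDedupAppend acc rest else pvDedupAppend (acc ++ [m]) rest := by
  rw [pvDedupAppend, List.foldl_cons]
  by_cases hc : acc.contains m
  · rw [if_pos hc, if_pos hc]; rfl
  · rw [if_neg hc, if_neg hc]; rfl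

theorem pvDedupAppend_prefix (acc xs : List String) :
    ∃ t, pvDedupAppend acc xs = acc ++ t := by
  induction xs generalizing acc with
  | nil => exact ⟨[], by simp [pvDedupAppend]⟩
  | cons m rest ih =>
    rw [pvDedupAppend_cons]
    by_cases hc : acc.contains m
    · rw [if_pos hc]; exact ih acc
    · rw [if_neg hc]
      obtain ⟨t, ht⟩ := ih (acc ++ [m])
      exact ⟨m :: t, by rw [ht, List.append_assoc]; rfl⟩

-- A's capped loop computes the truncation of the uncapped dedup
theorem pvMerge_eq_take (maxm : Int) (acc xs : List String)
    (h : (acc.length : Int) ≤ maxm) :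
    pvMerge maxm acc xs = List.take maxm.toNat (pvDedupAppend acc xs) := by
  induction xs generalizing acc with
  | nil =>
    simp only [pvMerge, pvDedupAppend, List.foldl_nil]
    exact (List.take_of_length_le (by omega)).symm
  | cons m rest ih =>
    rw [pvMerge, pvDedupAppend_cons]
    by_cases hge : (acc.length : Int) ≥ maxm
    · have hlen : acc.length = maxm.toNat := by omega
      rw [if_pos hge]
      by_cases hc : acc.contains m
      · rw [if_pos hc]
        obtain ⟨t, ht⟩ := pvDedupAppend_prefix acc rest
        rw [ht, ← hlen, List.take_left]
      · rw [if_neg hc]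
        obtain ⟨t, ht⟩ := pvDedupAppend_prefix (acc ++ [m]) rest
        rw [ht, List.append_assoc, ← hlen, List.take_left]
    · rw [if_neg hge]
      by_cases hc : acc.contains m
      · rw [if_pos hc, if_pos hc]; exact ih acc h
      · rw [if_neg hc, if_neg hc]; exact ih (acc ++ [m]) (by simp; omega)

-- B's dict.fromkeys dedup is the uncapped dedup-append from []
theorem dedup_eq_pvDedupAppend (xs : List String) :
    PySem.List.dedup xs = pvDedupAppend [] xs := by
  rw [PySem.List.dedup_eq_ofList, PySem.Set.ofList_eq_foldl]
  rfl

theorem pvPad_eq (maxm : Int) (n : ℕ) : ∀ acc : List String, (maxm - acc.length).toNat = n →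
    pvPad maxm acc = acc ++ (PySem.List.pyRange (acc.length : Int) maxm 1).map
      (fun i => "material_" ++ PySem.Int.toStr (i + 1)) := by
  induction n with
  | zero =>
    intro acc hn
    have hge : ¬ ((acc.length : Int) < maxm) := by omega
    rw [pvPad]
    simp only [hge, if_false]
    rw [PySem.List.pyRange_one_eq_nil (by omega)]
    simp
  | succ k ih =>
    intro acc hn
    have hlt : (acc.length : Int) < maxm := by omega
    rw [pvPad]
    simp only [hlt, if_pos, if_true]
    rw [ih (acc ++ ["material_" ++ PySem.Int.toStr ((acc.length : Int) + 1)]) (by simp; omega)]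
    rw [PySem.List.pyRange_one_cons hlt]
    simp

theorem combine_and_validate_materials_py_spec : Claim_equal_combine_and_validate_materials_py := by
  intro km ai maxm _hDom hPre
  unfold Pre_combine_and_validate_materials_py at hPre
  unfold Spec_combine_and_validate_materials_py
  unfold combine_and_validate_materials_py combine_and_validate_materials_py_alt
  simp only []
  set d := PySem.Dict.ofList km with hd
  set P := PySem.List.slice (d.getD "primary_materials" []) none (some maxm) with hP
  set S := d.getD "secondary_materials" [] with hS
  have hPlen : (P.length : Int) ≤ maxm := by
    rw [hP, PySem.List.slice_to _ hPre]
    have := List.length_take_le maxm.toNat (d.getD "primary_materials" [])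
    omega
  -- B's guarded candidate pieces equal P and S whenever they matter
  have hPB : (if km ≠ [] then P else []) ++ ai ++ (if km ≠ [] then S else []) = P ++ ai ++ S := by
    by_cases hkm : km = []
    · subst hkm
      have hP0 : P = [] := by
        have hg0 : (PySem.Dict.ofList ([] : List (String × List String))).getD "primary_materials" [] = ([] : List String) := rfl
        rw [hP, hd, hg0, PySem.List.slice_to _ hPre]; simp
      have hS0 : S = [] := by rw [hS, hd]; rfl
      simp [hP0, hS0]
    · simp [hkm]
  rw [hPB]
  -- the three phases of A coincide with the reference merge over the concatenation
  set c1 := (if km ≠ [] ∧ d.contains "primary_materials" then pvDedupAppend [] P else []) with hc1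
  have h1 : pvMerge maxm [] P = c1 := by
    rw [hc1]
    split_ifs with hg
    · exact pvMerge_eq_pvDedupAppend maxm [] P (by simpa using hPlen)
    · rw [Classical.not_and_iff_not_or_not] at hg
      have hnc : d.contains "primary_materials" = false := by
        rcases hg with hg | hg
        · have hkm : km = [] := by simpa using hg
          rw [hd, hkm]; decide
        · simpa using hg
      have hPnil : P = [] := by
        rw [hP, pv_getD_nil d _ hnc, PySem.List.slice_to _ hPre]
        simp
      rw [hPnil]; rfl
  set c2 := pvTakeLoop maxm c1 ai with hc2
  have h2 : pvMerge maxm c1 ai = c2 := (pvTakeLoop_eq_pvMerge maxm c1 ai).symm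
  set c3 := (if (c2.length : Int) < maxm ∧ km ≠ [] ∧ d.contains "secondary_materials" then pvTakeLoop maxm c2 S else c2) with hc3
  have h3 : pvMerge maxm c2 S = c3 := by
    rw [hc3]
    split_ifs with hg
    · exact (pvTakeLoop_eq_pvMerge maxm c2 S).symm
    · rw [Classical.not_and_iff_not_or_not] at hg
      rcases hg with hg | hg
      · exact pvMerge_of_ge maxm c2 S (by omega)
      · rw [Classical.not_and_iff_not_or_not] at hg
        have hnc : d.contains "secondary_materials" = false := by
          rcases hg with hg | hg
          · have hkm : km = [] := by simpa using hg
            rw [hd, hkm]; decide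
          · simpa using hg
        have hSnil : S = [] := by
          rw [hS]; exact pv_getD_nil d _ hnc
        rw [hSnil]; rfl
  have hcand : pvMerge maxm [] (P ++ ai ++ S) = c3 := by
    rw [pvMerge_append, pvMerge_append, h1, h2, h3]
  -- c3 equals B's dedup-then-slice result
  have hres : PySem.List.slice (PySem.List.dedup (P ++ ai ++ S)) none (some maxm) = c3 := by
    rw [PySem.List.slice_to _ hPre, dedup_eq_pvDedupAppend,
        ← pvMerge_eq_take maxm [] _ (by simpa using hPre), hcand]
  rw [hres]
  -- padding and the final (no-op) slice on A's side
  have hc3len : ((c3.length : Int)) ≤ maxm := by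
    rw [← hcand]
    exact pvMerge_length_le maxm [] _ (by simpa using hPre)
  rw [pvPad_eq maxm _ c3 rfl]
  rw [PySem.List.slice_to _ hPre]
  apply List.take_of_length_le
  simp only [List.length_append, List.length_map, PySem.List.length_pyRange_one]
  omega
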